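-- pv_equiv track=rewrite | github.com/TanelPaal/Programming-Introductory-Course | TK/tk0/exam.py | workday_count
-- ===== SOURCE A (Python) =====
-- def workday_count(days: int) -> int:
--     """
--     Given number of days.
--
--     Return how many of these days are workdays.
--     Workdays are first five days of the weeks, last two are not.
--     Always start from the start of the week.
--
--     workday_count(9) => 7
--     workday_count(3) => 3
--     workday_count(7) => 5
--     workday_count(15) => 11
--
--     :param days: given number of days
--     :return: workdays in given days
--     """
--     workdays = 0
--     day_of_week = 0  # 0 corresponds to Monday, 1 to Tuesday, and so on
--
--     for day in range(days):
--         # Check if the current day is a workday (Monday to Friday)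
--         if day_of_week < 5:
--             workdays += 1
--
--         # Move to the next day of the week
--         day_of_week = (day_of_week + 1) % 7
--
--     return workdays
-- ===== SOURCE B (Python) =====
-- def workday_count(days: int) -> int:
--     if days <= 0:
--         return 0
--     return (days // 7) * 5 + min(days % 7, 5)
-- ===== Notes on version B (the rewrite author's own statement) =====
-- stated objective: faster
-- what changed: Replaced the day-by-day loop with a closed-form formula: five workdays per full week plus the workdays of the leftover partial week.
import Mathlib
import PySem

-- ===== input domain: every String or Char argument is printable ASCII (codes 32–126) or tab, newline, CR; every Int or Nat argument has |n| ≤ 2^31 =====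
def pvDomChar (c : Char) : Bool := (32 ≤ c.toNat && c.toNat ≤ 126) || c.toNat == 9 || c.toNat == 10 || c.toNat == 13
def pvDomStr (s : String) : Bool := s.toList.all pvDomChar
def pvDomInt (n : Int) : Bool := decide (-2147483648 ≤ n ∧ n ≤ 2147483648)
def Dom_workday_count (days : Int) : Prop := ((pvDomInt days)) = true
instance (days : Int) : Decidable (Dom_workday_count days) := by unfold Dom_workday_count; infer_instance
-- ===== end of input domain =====

-- B replaces A's O(days) day-by-day loop with a closed-form formula (5 per full week plus min(remainder, 5)).

-- ===== PORT A =====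
-- literal port of A's loop: state (workdays, day_of_week), one step per day
def workday_count (days : Int) : Int :=
  ((PySem.List.pyRange 0 days 1).foldl
    (fun (s : Int × Int) _ =>
      ((if s.2 < 5 then s.1 + 1 else s.1), PySem.Int.mod (s.2 + 1) 7))
    (0, 0)).1

-- ===== PORT B =====
def workday_count_alt (days : Int) : Int :=
  if days ≤ 0 then 0
  else PySem.Int.floordiv days 7 * 5 + min (PySem.Int.mod days 7) 5

-- ===== PRECONDITION & SPEC =====
def Spec_workday_count (days : Int) (out : Int) : Prop := out = workday_count_alt days
instance (days : Int) (out : Int) : Decidable (Spec_workday_count days out) := by unfold Spec_workday_count; infer_instance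

-- ===== CLAIM (what is proved, stated in full; the proofs are below) =====
def Claim_equal_workday_count : Prop := ∀ (days : Int), Dom_workday_count days → Spec_workday_count days (workday_count days)

-- ===== LEMMAS AND PROOFS =====

-- loop invariant: after n steps the state is ((n/7)*5 + min (n%7) 5, n%7)
theorem workday_loop_inv (n : Nat) :
    (List.range n).foldl
      (fun (s : Int × Int) _ =>
        ((if s.2 < 5 then s.1 + 1 else s.1), PySem.Int.mod (s.2 + 1) 7))
      (0, 0)
    = ((n : Int) / 7 * 5 + min ((n : Int) % 7) 5, (n : Int) % 7) := by
  induction n with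
  | zero => simp
  | succ n ih =>
    rw [List.range_succ, List.foldl_append, ih]
    simp only [List.foldl_cons, List.foldl_nil]
    have h : PySem.Int.mod ((n : Int) % 7 + 1) 7 = ((n : Int) % 7 + 1) % 7 :=
      PySem.Int.mod_eq_emod_of_pos (by omega)
    rw [h, Prod.mk.injEq]
    push_cast
    refine ⟨?_, ?_⟩
    · split_ifs with hlt <;> omega
    · omega

theorem workday_count_eq_alt (days : Int) : workday_count days = workday_count_alt days := by
  unfold workday_count workday_count_alt
  rw [PySem.List.pyRange_one]
  rw [List.foldl_map, workday_loop_inv (days - 0).toNat]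
  by_cases hd : days ≤ 0
  · simp only [hd, if_pos]
    omega
  · simp only [hd, if_false]
    have hc : ((days - 0).toNat : Int) = days := by omega
    rw [hc, PySem.Int.floordiv_eq_ediv_of_pos (by omega),
      PySem.Int.mod_eq_emod_of_pos (by omega)]

-- ===== VERDICT (by name: the statement is the Claim_ definition above) =====
theorem workday_count_spec : Claim_equal_workday_count := by
  intro days _
  exact workday_count_eq_alt days
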